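-- pv_equiv track=rewrite | github.com/AlexandrBursak/python_test | funny_task/solution_3b.py | solution
-- ===== SOURCE A (Python) =====
-- def solution(l):
--     ress = 0
--
--     c = {}
--     for i in range(0, len(l)):
--         c[i] = 0
--         for cj in range(0, i):
--             if l[i]%l[cj]==0:
--                 c[i] = c[i] + 1
--                 ress = ress + c[cj]
--
--     return ress
-- ===== SOURCE B (Python) =====
-- def solution(l):
--     n = len(l)
--     total = 0
--     for b in range(n):
--         left = 0
--         for a in range(b):
--             if l[b] % l[a] == 0:
--                 left += 1
--         right = 0
--         for k in range(b + 1, n):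
--             if l[k] % l[b] == 0:
--                 right += 1
--         total += left * right
--     return total
-- ===== Notes on version B (the rewrite author's own statement) =====
-- stated objective: alternative
-- what changed: Replaced the dict-based DP (per-index divisor counts c[] accumulated online into ress) by a direct per-middle-index computation: for each b count earlier divisors of l[b] and later multiples of l[b] with two plain loops and add their product.
import Mathlib
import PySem

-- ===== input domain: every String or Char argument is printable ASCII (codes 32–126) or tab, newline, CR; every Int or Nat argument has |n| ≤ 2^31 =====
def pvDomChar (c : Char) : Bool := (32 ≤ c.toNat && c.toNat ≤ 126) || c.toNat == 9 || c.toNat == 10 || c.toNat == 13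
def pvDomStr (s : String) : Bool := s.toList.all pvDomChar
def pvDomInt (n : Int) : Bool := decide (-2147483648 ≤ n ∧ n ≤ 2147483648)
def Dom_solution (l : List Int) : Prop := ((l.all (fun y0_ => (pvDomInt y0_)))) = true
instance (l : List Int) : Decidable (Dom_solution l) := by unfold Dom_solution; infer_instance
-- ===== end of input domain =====

-- B replaces A's dict-based DP by a per-middle-index count-and-multiply pass (alternative algorithm, same cost; same return value on Pre_).

-- ===== PORT A =====
def solution (l : List Int) : Int :=
  (((PySem.List.pyRange 0 (PySem.List.len l) 1).foldl
    (fun (st : Int × PySem.Dict Int Int) i =>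
      let st : Int × PySem.Dict Int Int := (st.1, st.2.insert i 0)
      (PySem.List.pyRange 0 i 1).foldl
        (fun (st : Int × PySem.Dict Int Int) cj =>
          if PySem.Int.mod (PySem.List.pyGetD l i 0) (PySem.List.pyGetD l cj 0) = 0 then
            let c' := st.2.insert i (st.2.getD i 0 + 1)
            (st.1 + c'.getD cj 0, c')
          else st) st)
    (0, PySem.Dict.empty))).1

-- ===== PORT B =====
def solution_alt (l : List Int) : Int :=
  let n := PySem.List.len l
  (PySem.List.pyRange 0 n 1).foldl (fun total b =>
    let left := (PySem.List.pyRange 0 b 1).foldl (fun left a =>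
      if PySem.Int.mod (PySem.List.pyGetD l b 0) (PySem.List.pyGetD l a 0) = 0 then
        left + 1
      else left) 0
    let right := (PySem.List.pyRange (b + 1) n 1).foldl (fun right k =>
      if PySem.Int.mod (PySem.List.pyGetD l k 0) (PySem.List.pyGetD l b 0) = 0 then
        right + 1
      else right) 0
    total + left * right) 0

-- ===== PRECONDITION & SPEC =====
-- Pre_ excludes exactly the inputs on which the Python A raises ZeroDivisionError: a 0 anywhere before the last element.
def Pre_solution (l : List Int) : Prop := ∀ x ∈ l.dropLast, x ≠ 0
instance (l : List Int) : Decidable (Pre_solution l) := by unfold Pre_solution; infer_instance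
def pvWitness_solution : List Int := [2, 4, 3, 8, 16]
def Spec_solution (l : List Int) (out : Int) : Prop := out = solution_alt l
instance (l : List Int) (out : Int) : Decidable (Spec_solution l out) := by unfold Spec_solution; infer_instance

-- ===== CLAIM (what is proved, stated in full; the proofs are below) =====
def Claim_equal_solution : Prop := ∀ (l : List Int), Dom_solution l → Pre_solution l → Spec_solution l (solution l)

-- ===== LEMMAS AND PROOFS =====

/-- The divisibility test both programs apply to a pair of indices: `l[b] % l[a] == 0`. -/
def pvD (l : List Int) (a b : Int) : Bool :=
  PySem.Int.mod (PySem.List.pyGetD l b 0) (PySem.List.pyGetD l a 0) == 0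

/-- Number of earlier indices dividing `l[j]` — the final value of A's `c[j]`. -/
noncomputable def pvC (l : List Int) (j : Int) : Int :=
  ∑ a ∈ Finset.Ico 0 j, if pvD l a j then (1 : Int) else 0

/-- Number of later indices (below `n`) that `l[b]` divides. -/
noncomputable def pvE (l : List Int) (b n : Int) : Int :=
  ∑ k ∈ Finset.Ico (b + 1) n, if pvD l b k then (1 : Int) else 0

/-- `Finset.sum_Ico_succ_top` for `Int` indices. -/
theorem pv_sum_Ico_succ (a n : Int) (hn : a ≤ n) (f : Int → Int) :
    ∑ k ∈ Finset.Ico a (n + 1), f k = (∑ k ∈ Finset.Ico a n, f k) + f n :=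
  Eq.symm (Finset.sum_Ico_add_eq_sum_Ico_add_one hn f)

/-- A pure accumulation loop over `range(a, b)` is the sum over `Ico a b`. -/
theorem pv_foldl_sum (f : Int → Int) (a b r : Int) :
    (PySem.List.pyRange a b 1).foldl (fun res x => res + f x) r =
      r + ∑ k ∈ Finset.Ico a b, f k := by
  by_cases h : a ≤ b
  · induction b, h using Int.le_induction generalizing r with
    | base => simp [PySem.List.pyRange_one_eq_nil (le_refl a)]
    | succ n hn ih =>
        rw [PySem.List.pyRange_one_succ_right hn, List.foldl_append,
          pv_sum_Ico_succ _ _ hn _, ih]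
        simp [add_assoc]
  · rw [PySem.List.pyRange_one_eq_nil (by omega), Finset.Ico_eq_empty (by omega)]
    simp

/-- The body of A's inner loop (over `cj`), for a fixed outer index `i`. -/
def pvStepA (l : List Int) (i : Int) (st : Int × PySem.Dict Int Int) (cj : Int) :
    Int × PySem.Dict Int Int :=
  if PySem.Int.mod (PySem.List.pyGetD l i 0) (PySem.List.pyGetD l cj 0) = 0 then
    let c' := st.2.insert i (st.2.getD i 0 + 1)
    (st.1 + c'.getD cj 0, c')
  else st

theorem pvStepA_pos (l : List Int) (i : Int) (st : Int × PySem.Dict Int Int) (cj : Int)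
    (hd : PySem.Int.mod (PySem.List.pyGetD l i 0) (PySem.List.pyGetD l cj 0) = 0) :
    pvStepA l i st cj =
      (st.1 + (st.2.insert i (st.2.getD i 0 + 1)).getD cj 0,
        st.2.insert i (st.2.getD i 0 + 1)) := by
  simp [pvStepA, hd]

theorem pvStepA_neg (l : List Int) (i : Int) (st : Int × PySem.Dict Int Int) (cj : Int)
    (hd : ¬ PySem.Int.mod (PySem.List.pyGetD l i 0) (PySem.List.pyGetD l cj 0) = 0) :
    pvStepA l i st cj = st := by
  simp [pvStepA, hd]

/-- Invariant of A's inner loop: it adds the row sum to `ress` and counts divisors into `c[i]`. -/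
theorem pvInner (l : List Int) (i r : Int) (c : PySem.Dict Int Int)
    (hc : ∀ j : Int, 0 ≤ j → j < i → c.getD j 0 = pvC l j) (hci : c.getD i 0 = 0)
    (m : Int) (hm0 : 0 ≤ m) (hmi : m ≤ i) :
    ((PySem.List.pyRange 0 m 1).foldl (pvStepA l i) (r, c)).1 =
        r + ∑ j ∈ Finset.Ico 0 m, (if pvD l j i then pvC l j else 0) ∧
      (∀ j : Int, 0 ≤ j → j < i →
        ((PySem.List.pyRange 0 m 1).foldl (pvStepA l i) (r, c)).2.getD j 0 = pvC l j) ∧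
      ((PySem.List.pyRange 0 m 1).foldl (pvStepA l i) (r, c)).2.getD i 0 =
        ∑ j ∈ Finset.Ico 0 m, (if pvD l j i then (1 : Int) else 0) := by
  induction m, hm0 using Int.le_induction with
  | base =>
      rw [PySem.List.pyRange_one_eq_nil (le_refl 0)]
      simpa using ⟨hc, hci⟩
  | succ m hm ih =>
      obtain ⟨h1, h2, h3⟩ := ih (by omega)
      rw [PySem.List.pyRange_one_succ_right hm, List.foldl_append]
      set st := (PySem.List.pyRange 0 m 1).foldl (pvStepA l i) (r, c) with hst
      have hmne : m ≠ i := by omega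
      by_cases hd : PySem.Int.mod (PySem.List.pyGetD l i 0) (PySem.List.pyGetD l m 0) = 0
      · have hDd : pvD l m i = true := by simp [pvD, hd]
        simp only [List.foldl_cons, List.foldl_nil, pvStepA_pos l i st m hd]
        refine ⟨?_, ?_, ?_⟩
        · rw [PySem.Dict.getD_insert, if_neg hmne, h2 m (by omega) (by omega), h1,
            pv_sum_Ico_succ _ _ hm _, hDd]
          simp [add_assoc]
        · intro j hj0 hji
          rw [PySem.Dict.getD_insert, if_neg (by omega), h2 j hj0 hji]
        · rw [PySem.Dict.getD_insert, if_pos rfl, h3,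
            pv_sum_Ico_succ _ _ hm _, hDd]
          simp
      · have hDd : pvD l m i = false := by simp [pvD, hd]
        simp only [List.foldl_cons, List.foldl_nil, pvStepA_neg l i st m hd]
        exact ⟨by rw [h1, pv_sum_Ico_succ _ _ hm _, hDd]; simp, h2,
          by rw [h3, pv_sum_Ico_succ _ _ hm _, hDd]; simp⟩

/-- The body of A's outer loop (over `i`). -/
def pvOuterStepA (l : List Int) (st : Int × PySem.Dict Int Int) (i : Int) :
    Int × PySem.Dict Int Int :=
  (PySem.List.pyRange 0 i 1).foldl (pvStepA l i) (st.1, st.2.insert i 0)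

/-- Invariant of A's outer loop: `ress` is the double sum, `c` holds the divisor counts. -/
theorem pvOuter (l : List Int) (n : Int) (hn : 0 ≤ n) :
    ((PySem.List.pyRange 0 n 1).foldl (pvOuterStepA l) (0, PySem.Dict.empty)).1 =
        ∑ i ∈ Finset.Ico 0 n, ∑ j ∈ Finset.Ico 0 i, (if pvD l j i then pvC l j else 0) ∧
      ∀ j : Int, 0 ≤ j → j < n →
        ((PySem.List.pyRange 0 n 1).foldl (pvOuterStepA l) (0, PySem.Dict.empty)).2.getD j 0 =
          pvC l j := by
  induction n, hn using Int.le_induction with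
  | base =>
      rw [PySem.List.pyRange_one_eq_nil (le_refl 0)]
      exact ⟨by simp, fun j h0 h1 => absurd h1 (by omega)⟩
  | succ n hn ih =>
      obtain ⟨h1, h2⟩ := ih
      rw [PySem.List.pyRange_one_succ_right hn, List.foldl_append]
      set st := (PySem.List.pyRange 0 n 1).foldl (pvOuterStepA l) (0, PySem.Dict.empty) with hst
      have hc : ∀ j : Int, 0 ≤ j → j < n → (st.2.insert n 0).getD j 0 = pvC l j := by
        intro j hj0 hjn
        rw [PySem.Dict.getD_insert, if_neg (by omega)]
        exact h2 j hj0 hjn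
      have hci : (st.2.insert n 0).getD n 0 = 0 := by
        rw [PySem.Dict.getD_insert, if_pos rfl]
      obtain ⟨g1, g2, g3⟩ := pvInner l n st.1 (st.2.insert n 0) hc hci n hn (le_refl n)
      simp only [List.foldl_cons, List.foldl_nil, pvOuterStepA]
      refine ⟨?_, ?_⟩
      · rw [g1, h1, pv_sum_Ico_succ _ _ hn _]
      · intro j hj0 hjn
        rcases lt_or_eq_of_le (by omega : j ≤ n) with h | h
        · exact g2 j hj0 h
        · subst h
          rw [g3, pvC]

/-- A's port computes the double sum over (j, i) pairs of `c[j]`. -/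
theorem pv_solution_eq (l : List Int) :
    solution l = ∑ i ∈ Finset.Ico 0 (l.length : Int),
      ∑ j ∈ Finset.Ico 0 i, (if pvD l j i then pvC l j else 0) := by
  have h : solution l =
      ((PySem.List.pyRange 0 (l.length : Int) 1).foldl (pvOuterStepA l)
        (0, PySem.Dict.empty)).1 := by
    simp only [solution, PySem.List.len_eq]
    rfl
  rw [h, (pvOuter l (l.length : Int) (by positivity)).1]

/-- B's port computes, for each middle index `b`, `c(b) * e(b)` and sums these. -/
theorem pv_solution_alt_eq (l : List Int) :
    solution_alt l = ∑ b ∈ Finset.Ico 0 (l.length : Int),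
      pvC l b * pvE l b (l.length : Int) := by
  simp only [solution_alt, PySem.List.len_eq]
  have hleft : ∀ b : Int,
      (PySem.List.pyRange 0 b 1).foldl (fun left a =>
        if PySem.Int.mod (PySem.List.pyGetD l b 0) (PySem.List.pyGetD l a 0) = 0 then
          left + 1
        else left) 0 = pvC l b := by
    intro b
    have hcg : ∀ a ∈ PySem.List.pyRange 0 b 1, ∀ left : Int,
        (if PySem.Int.mod (PySem.List.pyGetD l b 0) (PySem.List.pyGetD l a 0) = 0
          then left + 1 else left) = left + (if pvD l a b then (1 : Int) else 0) := by
      intro a _ left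
      by_cases hd : PySem.Int.mod (PySem.List.pyGetD l b 0) (PySem.List.pyGetD l a 0) = 0 <;>
        simp [pvD, hd]
    rw [PySem.List.foldl_congr_mem' _ _ _ _ hcg, pv_foldl_sum, pvC]
    simp
  have hright : ∀ b : Int,
      (PySem.List.pyRange (b + 1) (l.length : Int) 1).foldl (fun right k =>
        if PySem.Int.mod (PySem.List.pyGetD l k 0) (PySem.List.pyGetD l b 0) = 0 then
          right + 1
        else right) 0 = pvE l b (l.length : Int) := by
    intro b
    have hcg : ∀ k ∈ PySem.List.pyRange (b + 1) (l.length : Int) 1, ∀ right : Int,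
        (if PySem.Int.mod (PySem.List.pyGetD l k 0) (PySem.List.pyGetD l b 0) = 0
          then right + 1 else right) = right + (if pvD l b k then (1 : Int) else 0) := by
      intro k _ right
      by_cases hd : PySem.Int.mod (PySem.List.pyGetD l k 0) (PySem.List.pyGetD l b 0) = 0 <;>
        simp [pvD, hd]
    rw [PySem.List.foldl_congr_mem' _ _ _ _ hcg, pv_foldl_sum, pvE]
    simp
  have hout : ∀ b ∈ PySem.List.pyRange 0 (l.length : Int) 1, ∀ total : Int,
      (total + ((PySem.List.pyRange 0 b 1).foldl (fun left a =>
          if PySem.Int.mod (PySem.List.pyGetD l b 0) (PySem.List.pyGetD l a 0) = 0 then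
            left + 1
          else left) 0) * ((PySem.List.pyRange (b + 1) (l.length : Int) 1).foldl
            (fun right k =>
          if PySem.Int.mod (PySem.List.pyGetD l k 0) (PySem.List.pyGetD l b 0) = 0 then
            right + 1
          else right) 0)) =
        total + pvC l b * pvE l b (l.length : Int) := by
    intro b _ total
    rw [hleft b, hright b]
  rw [PySem.List.foldl_congr_mem' _ _ _ _ hout, pv_foldl_sum]
  simp

/-- The combinatorial heart: A's double sum counts the triples `a < b < k` with
`l[a] ∣ l[b]` and `l[b] ∣ l[k]`, grouped by the middle index — B's sum of products. -/
theorem pv_swap (l : List Int) (n : Int) :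
    (∑ i ∈ Finset.Ico 0 n, ∑ j ∈ Finset.Ico 0 i, (if pvD l j i then pvC l j else 0)) =
      ∑ j ∈ Finset.Ico 0 n, pvC l j * pvE l j n := by
  rw [Finset.sum_comm' (s' := fun j => Finset.Ico (j + 1) n) (t' := Finset.Ico 0 n)
    (fun i j => by simp only [Finset.mem_Ico]; omega)]
  refine Finset.sum_congr rfl fun j _ => ?_
  rw [pvE, Finset.mul_sum]
  refine Finset.sum_congr rfl fun i _ => ?_
  by_cases h : pvD l j i <;> simp [h]

-- ===== VERDICT (by name: the statement is the Claim_ definition above) =====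
theorem solution_spec : Claim_equal_solution := by
  intro l _ _
  unfold Spec_solution
  rw [pv_solution_eq, pv_solution_alt_eq, pv_swap]
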